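-- pv_equiv track=rewrite | github.com/H4SKEY/Bonch | net_security_labs/lab6/utils.py | generate_shares
-- ===== SOURCE A (Python) =====
-- def generate_shares(p, M, coeffs, n):
--     """
--     Генерация долей секрета.
--     p: модуль
--     M: секрет (a0)
--     coeffs: список коэффициентов [a1, a2, ...]
--     n: количество долей
--     """
--     shares = []
--     all_coeffs = [M] + coeffs
--
--     for i in range(1, n + 1):
--         y = 0
--         for power, coeff in enumerate(all_coeffs):
--             y = (y + coeff * pow(i, power, p)) % p
--         shares.append((i, y))
--
--     return shares
-- ===== SOURCE B (Python) =====
-- def generate_shares(p, M, coeffs, n):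
--     """
--     Генерация долей секрета (Horner's method: no modular exponentiation per term).
--     """
--     def horner(i):
--         y = 0
--         for c in reversed(coeffs):
--             y = (y * i + c) % p
--         return (y * i + M) % p
--     return [(i, horner(i)) for i in range(1, n + 1)]
-- ===== Notes on version B (the rewrite author's own statement) =====
-- stated objective: faster
-- what changed: Replaces the per-term modular exponentiation pow(i, power, p) inside the inner loop by Horner's rule evaluation of the polynomial (fold over the reversed coefficients), and builds the share list as a comprehension instead of append-in-a-loop.
-- outside the precondition, e.g. on generate_shares(0, 1, [2], 2): A raises ValueError, B raises ZeroDivisionError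
import Mathlib
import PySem

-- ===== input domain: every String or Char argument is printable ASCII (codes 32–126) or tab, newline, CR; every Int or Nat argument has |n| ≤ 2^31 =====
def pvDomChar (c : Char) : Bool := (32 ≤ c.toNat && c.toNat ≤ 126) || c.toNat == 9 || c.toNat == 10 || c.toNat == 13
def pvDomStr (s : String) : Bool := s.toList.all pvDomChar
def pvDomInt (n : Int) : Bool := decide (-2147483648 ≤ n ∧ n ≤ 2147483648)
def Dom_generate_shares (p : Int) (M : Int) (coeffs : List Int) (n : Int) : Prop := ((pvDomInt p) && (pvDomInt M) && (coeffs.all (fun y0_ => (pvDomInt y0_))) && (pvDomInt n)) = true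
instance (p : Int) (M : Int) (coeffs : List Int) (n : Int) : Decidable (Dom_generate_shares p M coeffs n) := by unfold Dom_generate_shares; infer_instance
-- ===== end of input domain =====

-- B replaces A's per-term pow(i, power, p) by Horner's rule (objective: faster, O(n·k) vs O(n·k·log k)).

-- ===== PORT A =====
def generate_shares (p : Int) (M : Int) (coeffs : List Int) (n : Int) : List (Int × Int) :=
  (PySem.List.pyRange 1 (n + 1) 1).foldl
    (fun shares i =>
      shares ++ [(i,
        (PySem.List.enumerate (M :: coeffs) 0).foldl
          (fun y pc => PySem.Int.mod (y + pc.2 * PySem.Int.powMod i pc.1.toNat p) p) 0)])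
    []

-- ===== PORT B =====
def hornerB (p : Int) (coeffs : List Int) (M : Int) (i : Int) : Int :=
  PySem.Int.mod
    ((coeffs.reverse.foldl (fun y c => PySem.Int.mod (y * i + c) p) 0) * i + M) p

def generate_shares_alt (p : Int) (M : Int) (coeffs : List Int) (n : Int) : List (Int × Int) :=
  (PySem.List.pyRange 1 (n + 1) 1).map (fun i => (i, hornerB p coeffs M i))

-- ===== PRECONDITION & SPEC =====
-- Pre_ excludes exactly the inputs on which Python A raises: p = 0 with n ≥ 1 makes pow(i, power, 0) raise ValueError.
def Pre_generate_shares (p : Int) (M : Int) (coeffs : List Int) (n : Int) : Prop := p ≠ 0 ∨ n ≤ 0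
instance (p : Int) (M : Int) (coeffs : List Int) (n : Int) : Decidable (Pre_generate_shares p M coeffs n) := by unfold Pre_generate_shares; infer_instance

def pvWitness_generate_shares : Int × Int × List Int × Int := (7, 3, [2, 5], 4)

def Spec_generate_shares (p : Int) (M : Int) (coeffs : List Int) (n : Int) (out : List (Int × Int)) : Prop := out = generate_shares_alt p M coeffs n
instance (p : Int) (M : Int) (coeffs : List Int) (n : Int) (out : List (Int × Int)) : Decidable (Spec_generate_shares p M coeffs n out) := by unfold Spec_generate_shares; infer_instance

-- ===== CLAIM (what is proved, stated in full; the proofs are below) =====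
def Claim_equal_generate_shares : Prop := ∀ (p : Int) (M : Int) (coeffs : List Int) (n : Int), Dom_generate_shares p M coeffs n → Pre_generate_shares p M coeffs n → Spec_generate_shares p M coeffs n (generate_shares p M coeffs n)

-- ===== LEMMAS AND PROOFS =====

-- the exact polynomial value ∑_j cs[j] * i^(k+j)
def polyS (i : Int) (k : Nat) : List Int → Int
  | [] => 0
  | c :: cs => c * i ^ k + polyS i (k + 1) cs

theorem fmod_congr {p a b : Int} (h : a ≡ b [ZMOD p]) : a.fmod p = b.fmod p := by
  obtain ⟨k, hk⟩ := (Int.ModEq.dvd h)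
  have : a = b + p * (-k) := by rw [mul_neg]; omega
  rw [this, Int.add_mul_fmod_self_left]

theorem fmod_modEq (x p : Int) : x.fmod p ≡ x [ZMOD p] := by
  rw [Int.modEq_iff_dvd]
  have := Int.fmod_def x p
  have : x - x.fmod p = p * (x.fdiv p) := by omega
  rw [this]; exact Dvd.intro _ rfl

theorem polyS_succ (i : Int) : ∀ (cs : List Int) (k : Nat), polyS i (k + 1) cs = polyS i k cs * i := by
  intro cs
  induction cs with
  | nil => intro k; simp [polyS]
  | cons c cs ih => intro k; simp [polyS, ih (k + 1)]; ring

-- A's inner loop computes (t + ∑ c_j i^(k+j)).fmod p from accumulator t.fmod p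
theorem lemA (p i : Int) : ∀ (cs : List Int) (k : Nat) (t : Int),
    (PySem.List.enumerate cs ((k : Nat) : Int)).foldl
      (fun y pc => PySem.Int.mod (y + pc.2 * PySem.Int.powMod i pc.1.toNat p) p) (t.fmod p)
      = (t + polyS i k cs).fmod p := by
  intro cs
  induction cs with
  | nil => intro k t; simp [PySem.List.enumerate_nil, polyS]
  | cons c cs ih =>
    intro k t
    rw [PySem.List.enumerate_cons]
    simp only [List.foldl_cons]
    have hcast : ((k : Int) + 1) = ((k + 1 : Nat) : Int) := by push_cast; ring
    have hstep : PySem.Int.mod (t.fmod p + c * PySem.Int.powMod i (k : Int).toNat p) p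
        = (t + c * i ^ k).fmod p := by
      simp only [PySem.Int.mod, PySem.Int.powMod, Int.toNat_natCast]
      exact fmod_congr (Int.ModEq.add (fmod_modEq t p)
        (Int.ModEq.mul_left c (fmod_modEq (i ^ k) p)))
    rw [hstep, hcast, ih (k + 1) (t + c * i ^ k)]
    simp [polyS]; ring_nf
-- B's inner fold is congruent to the raw polynomial value mod p
theorem lemB (p i : Int) : ∀ (cs : List Int),
    cs.foldr (fun c y => PySem.Int.mod (y * i + c) p) 0 ≡ polyS i 0 cs [ZMOD p] := by
  intro cs
  induction cs with
  | nil => simp [polyS]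
  | cons c cs ih =>
    simp only [List.foldr_cons, PySem.Int.mod, polyS, pow_zero]
    calc ((cs.foldr (fun c y => PySem.Int.mod (y * i + c) p) 0) * i + c).fmod p
        ≡ (cs.foldr (fun c y => PySem.Int.mod (y * i + c) p) 0) * i + c [ZMOD p] :=
          fmod_modEq _ p
      _ ≡ polyS i 0 cs * i + c [ZMOD p] := Int.ModEq.add_right c (Int.ModEq.mul_right i ih)
      _ = c * 1 + polyS i (0 + 1) cs := by rw [polyS_succ i cs 0]; ring

theorem inner_eq (p M i : Int) (coeffs : List Int) :
    (PySem.List.enumerate (M :: coeffs) 0).foldl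
      (fun y pc => PySem.Int.mod (y + pc.2 * PySem.Int.powMod i pc.1.toNat p) p) 0
      = hornerB p coeffs M i := by
  have hz : (0 : Int) = (0 : Int).fmod p := by simp
  calc (PySem.List.enumerate (M :: coeffs) 0).foldl
        (fun y pc => PySem.Int.mod (y + pc.2 * PySem.Int.powMod i pc.1.toNat p) p) 0
      = (0 + polyS i 0 (M :: coeffs)).fmod p := by
        conv_lhs => rw [hz]
        exact lemA p i (M :: coeffs) 0 0
    _ = hornerB p coeffs M i := by
        unfold hornerB
        rw [List.foldl_reverse]
        simp only [PySem.Int.mod]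
        apply fmod_congr
        have : (fun (y c : Int) => PySem.Int.mod (y * i + c) p) = fun y c => (y * i + c).fmod p := by
          funext y c; rfl
        calc (0 : Int) + polyS i 0 (M :: coeffs)
            = polyS i 0 coeffs * i + M := by simp [polyS, polyS_succ i coeffs 0]; ring
          _ ≡ (coeffs.foldr (fun c y => PySem.Int.mod (y * i + c) p) 0) * i + M [ZMOD p] :=
            Int.ModEq.add_right M (Int.ModEq.mul_right i (Int.ModEq.symm (lemB p i coeffs)))
          _ = (coeffs.foldr (fun x y => PySem.Int.mod (y * i + x) p) 0) * i + M := rfl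

-- ===== VERDICT (by name: the statement is the Claim_ definition above) =====
theorem generate_shares_spec : Claim_equal_generate_shares := by
  intro p M coeffs n _ _
  unfold Spec_generate_shares generate_shares generate_shares_alt
  rw [PySem.List.foldl_append_singleton_eq_map]
  exact List.map_congr_left (fun i _ => by rw [inner_eq])
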